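-- pv_equiv track=rewrite | github.com/DGRC-PT/SVInterpreter | svinterpreter_aux/report_table_fantomV2.py | merge_two_ordered_dicts
-- ===== SOURCE A (Python) =====
-- from collections import OrderedDict
--
-- def merge_two_ordered_dicts(x,y):
-- 	"""merges two ordered dict, with the care of adding
-- 	the breakpoint_B on the right locale. Returns the
-- 	merged dict"""
-- 	z=OrderedDict()
-- 	kh=list(y.keys())
-- 	bpp=kh.index("Breakpoint_B")
-- 	aa=0
-- 	for key, value in x.items():
-- 		if aa!=bpp+1:
-- 			z[key]=value
-- 			aa+=1
-- 		else:
-- 			z["Breakpoint_B"]=y["Breakpoint_B"]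
-- 			z[key]=value
-- 			aa+=1
-- 	return z
-- ===== SOURCE B (Python) =====
-- from collections import OrderedDict
--
-- def merge_two_ordered_dicts(x, y):
--     """merges two ordered dicts: build all of x first, then place Breakpoint_B by
--     appending it and rotating the keys after the splice position to the end."""
--     z = OrderedDict(x)
--     pos = list(y).index("Breakpoint_B") + 1
--     if pos < len(z):
--         z["Breakpoint_B"] = y["Breakpoint_B"]
--         for k in list(x)[pos:]:
--             z.move_to_end(k)
--     return z
-- ===== Notes on version B (the rewrite author's own statement) =====
-- stated objective: alternative
-- what changed: B builds the whole dict from x up front, appends Breakpoint_B once, and then repositions it by rotating the keys after the splice position to the end with move_to_end, instead of A's single pass that steps a counter and compares it to the splice position on every iteration.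
import Mathlib
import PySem

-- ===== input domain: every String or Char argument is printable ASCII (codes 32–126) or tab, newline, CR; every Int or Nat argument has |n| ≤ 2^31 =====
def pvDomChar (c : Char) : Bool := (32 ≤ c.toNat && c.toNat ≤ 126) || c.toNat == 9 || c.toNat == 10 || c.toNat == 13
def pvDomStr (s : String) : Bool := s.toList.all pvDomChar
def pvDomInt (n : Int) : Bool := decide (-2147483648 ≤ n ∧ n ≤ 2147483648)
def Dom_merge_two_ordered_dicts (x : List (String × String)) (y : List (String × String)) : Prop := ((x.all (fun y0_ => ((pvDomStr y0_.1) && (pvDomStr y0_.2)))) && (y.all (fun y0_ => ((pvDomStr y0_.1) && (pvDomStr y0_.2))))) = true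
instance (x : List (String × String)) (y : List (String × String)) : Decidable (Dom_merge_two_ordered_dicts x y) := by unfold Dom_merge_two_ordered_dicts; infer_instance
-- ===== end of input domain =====

-- B builds the whole dict from x first, then splices Breakpoint_B by appending it and
-- rotating the tail keys to the end (move_to_end), instead of A's counter-in-loop splice:
-- an alternative decomposition, same cost. Proved equal on Pre_ (see Pre_'s comment).


-- ===== PORT A =====
-- A: z = OrderedDict(); bpp = list(y.keys()).index("Breakpoint_B"); walk x.items() with a
-- counter aa, inserting y["Breakpoint_B"] exactly at the iteration where aa == bpp+1.
def merge_two_ordered_dicts (x : List (String × String)) (y : List (String × String)) : List (String × String) :=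
  let kh := y.map (·.1)
  let bpp : Nat := (PySem.List.index? kh "Breakpoint_B").getD 0   -- Pre_ guarantees some (else ValueError)
  let ybb := (PySem.Dict.mk y).getD "Breakpoint_B" ""            -- y["Breakpoint_B"]; Pre_ guarantees the key
  let st := x.foldl
    (fun (st : PySem.Dict String String × Nat) kv =>
      if st.2 ≠ bpp + 1 then (st.1.insert kv.1 kv.2, st.2 + 1)
      else ((st.1.insert "Breakpoint_B" ybb).insert kv.1 kv.2, st.2 + 1))
    (PySem.Dict.empty, 0)
  st.1.items

-- ===== PORT B =====
-- z.move_to_end(k): remove the entry with key k and re-append it at the end.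
-- (Python raises KeyError when k is missing; that branch is unreachable under Pre_,
-- the port keeps the dict unchanged there.)
def pvMove (d : PySem.Dict String String) (k : String) : PySem.Dict String String :=
  match d.get? k with
  | some v => (d.erase k).insert k v
  | none => d

-- B: z = OrderedDict(x); if pos < len(z): z["Breakpoint_B"] = y["Breakpoint_B"];
--    then z.move_to_end(k) for each key k of list(x)[pos:].
def merge_two_ordered_dicts_alt (x : List (String × String)) (y : List (String × String)) : List (String × String) :=
  let z := PySem.Dict.mk x
  let pos : Nat := (PySem.List.index? (y.map (·.1)) "Breakpoint_B").getD 0 + 1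
  if pos < z.size then
    (((x.map (·.1)).drop pos).foldl pvMove
      (z.insert "Breakpoint_B" ((PySem.Dict.mk y).getD "Breakpoint_B" ""))).items
  else z.items

-- ===== PRECONDITION & SPEC =====
-- Pre_ excludes: inputs where A raises ValueError ("Breakpoint_B" not among y's keys);
-- association lists with duplicate keys, which do not denote a Python dict; and x whose
-- tail (at or after the splice position) already contains "Breakpoint_B", where the final
-- position and value of that duplicate key are an accident of in-place dict-update order.
def Pre_merge_two_ordered_dicts (x : List (String × String)) (y : List (String × String)) : Prop :=
  "Breakpoint_B" ∈ y.map (·.1) ∧ (x.map (·.1)).Nodup ∧ (y.map (·.1)).Nodup ∧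
    "Breakpoint_B" ∉ (x.map (·.1)).drop ((PySem.List.index? (y.map (·.1)) "Breakpoint_B").getD 0 + 1)
instance (x : List (String × String)) (y : List (String × String)) : Decidable (Pre_merge_two_ordered_dicts x y) := by unfold Pre_merge_two_ordered_dicts; infer_instance
def pvWitness_merge_two_ordered_dicts : (List (String × String)) × (List (String × String)) :=
  ([("a", "1"), ("b", "2"), ("c", "3")], [("Breakpoint_B", "BB")])
def Spec_merge_two_ordered_dicts (x : List (String × String)) (y : List (String × String)) (out : List (String × String)) : Prop := out = merge_two_ordered_dicts_alt x y
instance (x : List (String × String)) (y : List (String × String)) (out : List (String × String)) : Decidable (Spec_merge_two_ordered_dicts x y out) := by unfold Spec_merge_two_ordered_dicts; infer_instance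

-- ===== CLAIM (what is proved, stated in full; the proofs are below) =====
def Claim_equal_merge_two_ordered_dicts : Prop := ∀ (x : List (String × String)) (y : List (String × String)), Dom_merge_two_ordered_dicts x y → Pre_merge_two_ordered_dicts x y → Spec_merge_two_ordered_dicts x y (merge_two_ordered_dicts x y)

-- ===== LEMMAS AND PROOFS =====

-- A's loop body (counter against the splice position) and the plain insert fold.
def pvGA (ybb : String) (bpp : Nat) (st : PySem.Dict String String × Nat) (kv : String × String) :
    PySem.Dict String String × Nat :=
  if st.2 ≠ bpp + 1 then (st.1.insert kv.1 kv.2, st.2 + 1)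
  else ((st.1.insert "Breakpoint_B" ybb).insert kv.1 kv.2, st.2 + 1)

def pvFB (d : PySem.Dict String String) (kv : String × String) : PySem.Dict String String :=
  d.insert kv.1 kv.2

-- canonical split form of A: insert head, splice if x is long enough, insert tail
def pvCanon (x : List (String × String)) (y : List (String × String)) : List (String × String) :=
  let pos : Nat := (PySem.List.index? (y.map (·.1)) "Breakpoint_B").getD 0 + 1
  let z0 := (x.take pos).foldl pvFB (PySem.Dict.empty : PySem.Dict String String)
  let z1 := if pos < x.length then z0.insert "Breakpoint_B" ((PySem.Dict.mk y).getD "Breakpoint_B" "") else z0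
  ((x.drop pos).foldl pvFB z1).items

-- While every counter value stays below bpp+1, A's loop is the plain insert fold.
theorem pvA_below (ybb : String) (bpp : Nat) :
    ∀ (l : List (String × String)) (z : PySem.Dict String String) (aa : Nat),
      aa + l.length ≤ bpp + 1 →
      l.foldl (pvGA ybb bpp) (z, aa) = (l.foldl pvFB z, aa + l.length) := by
  intro l
  induction l with
  | nil => intro z aa _; simp
  | cons kv t ih =>
    intro z aa h
    have hne : aa ≠ bpp + 1 := by simp at h; omega
    simp only [List.foldl_cons, pvGA, if_pos hne]
    rw [ih (z.insert kv.1 kv.2) (aa + 1) (by simp at h ⊢; omega)]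
    simp [pvFB]; omega

-- Once the counter has passed bpp+1, A's loop is again the plain insert fold.
theorem pvA_above (ybb : String) (bpp : Nat) :
    ∀ (l : List (String × String)) (z : PySem.Dict String String) (aa : Nat),
      bpp + 1 < aa →
      l.foldl (pvGA ybb bpp) (z, aa) = (l.foldl pvFB z, aa + l.length) := by
  intro l
  induction l with
  | nil => intro z aa _; simp
  | cons kv t ih =>
    intro z aa h
    have hne : aa ≠ bpp + 1 := by omega
    simp only [List.foldl_cons, pvGA, if_pos hne]
    rw [ih (z.insert kv.1 kv.2) (aa + 1) (by omega)]
    simp [pvFB]; omega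

-- A equals its canonical split form (unconditionally).
theorem pvA_eq_canon (x : List (String × String)) (y : List (String × String)) :
    merge_two_ordered_dicts x y = pvCanon x y := by
  unfold merge_two_ordered_dicts pvCanon
  simp only []
  set bpp : Nat := (PySem.List.index? (y.map (·.1)) "Breakpoint_B").getD 0 with hbpp
  set ybb := (PySem.Dict.mk y).getD "Breakpoint_B" "" with hybb
  set pos : Nat := bpp + 1 with hpos
  have hGA : (fun (st : PySem.Dict String String × Nat) kv =>
      if st.2 ≠ bpp + 1 then (st.1.insert kv.1 kv.2, st.2 + 1)
      else ((st.1.insert "Breakpoint_B" ybb).insert kv.1 kv.2, st.2 + 1)) = pvGA ybb bpp := rfl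
  rw [hGA]
  conv_lhs => rw [(List.take_append_drop pos x).symm]
  rw [List.foldl_append]
  have htlen : (x.take pos).length = min pos x.length := by simp
  rw [pvA_below ybb bpp (x.take pos) PySem.Dict.empty 0 (by omega)]
  rcases Nat.lt_or_ge pos x.length with hlt | hge
  · have hdrop : x.drop pos ≠ [] := by
      intro h
      have := List.drop_eq_nil_iff.mp h
      omega
    obtain ⟨kv, d', hd⟩ := List.exists_cons_of_ne_nil hdrop
    have hcnt : 0 + (x.take pos).length = bpp + 1 := by
      rw [htlen]; omega
    rw [hd, if_pos hlt]
    simp only [List.foldl_cons, pvGA, hcnt, if_neg (by omega : ¬ (bpp + 1 ≠ bpp + 1))]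
    rw [pvA_above ybb bpp d' _ (bpp + 1 + 1) (by omega)]
    simp [pvFB]
  · have hdrop : x.drop pos = [] := List.drop_eq_nil_iff.mpr (by omega)
    rw [hdrop, if_neg (by omega : ¬ pos < x.length)]
    simp

-- A fold of plain inserts over fresh, pairwise-distinct keys lists the pairs in order.
theorem pvFresh_fold (l : List (String × String)) (hnd : (l.map (·.1)).Nodup) :
    (l.foldl pvFB (PySem.Dict.empty : PySem.Dict String String)).items = l := by
  have h := PySem.Dict.items_foldl_insert_fresh (l := l) (k := (·.1)) (v := (·.2))
    (d := PySem.Dict.empty) (by intro a _; simp) hnd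
  simpa [pvFB] using h

-- Rotating a block of present keys to the end, in order, moves that block after the rest.
theorem pvMoveFold (t : List (String × String)) :
    ∀ (u e : List (String × String)) (d : PySem.Dict String String),
      d.items = u ++ t ++ e →
      (t.map (·.1)).Nodup →
      (∀ p ∈ t, p.1 ∉ u.map (·.1)) →
      (∀ p ∈ t, p.1 ∉ e.map (·.1)) →
      ((t.map (·.1)).foldl pvMove d).items = u ++ e ++ t := by
  induction t with
  | nil => intro u e d hd _ _ _; simpa using hd
  | cons p t' ih =>
    intro u e d hd hnd hu he
    have hpu : p.1 ∉ u.map (·.1) := hu p (by simp)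
    have hpe : p.1 ∉ e.map (·.1) := he p (by simp)
    have hpt' : p.1 ∉ t'.map (·.1) := by
      simp only [List.map_cons, List.nodup_cons] at hnd; exact hnd.1
    have hd' : d.items = u ++ p :: (t' ++ e) := by rw [hd]; simp
    have hkeyall : ∀ q, q ∈ u ++ t' ++ e → (q.1 == p.1) = false := by
      intro q hq
      simp only [List.mem_append] at hq
      simp only [beq_eq_false_iff_ne]
      intro h1
      rcases hq with (h' | h') | h'
      · exact hpu (by rw [← h1]; exact List.mem_map_of_mem h')
      · exact hpt' (by rw [← h1]; exact List.mem_map_of_mem h')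
      · exact hpe (by rw [← h1]; exact List.mem_map_of_mem h')
    have hnu : ∀ q ∈ u, (q.1 == p.1) = false := fun q hq =>
      hkeyall q (by simp only [List.mem_append]; exact Or.inl (Or.inl hq))
    have hnt : ∀ q ∈ t', (q.1 == p.1) = false := fun q hq =>
      hkeyall q (by simp only [List.mem_append]; exact Or.inl (Or.inr hq))
    have hne : ∀ q ∈ e, (q.1 == p.1) = false := fun q hq =>
      hkeyall q (by simp only [List.mem_append]; exact Or.inr hq)
    -- evaluate move_to_end on p.1
    have hget : d.get? p.1 = some p.2 := by
      simp only [PySem.Dict.get?, hd']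
      rw [List.find?_append, List.find?_eq_none.mpr (by intro q hq; simp [hnu q hq]),
        Option.none_or, List.find?_cons_of_pos (by simp)]
      rfl
    have herase : (d.erase p.1).items = u ++ t' ++ e := by
      show List.filter _ d.items = _
      rw [hd', List.filter_append, List.filter_cons_of_neg (by simp), List.filter_append,
        List.filter_eq_self.mpr (by intro q hq; simp [hnu q hq]),
        List.filter_eq_self.mpr (by intro q hq; simp [hnt q hq]),
        List.filter_eq_self.mpr (by intro q hq; simp [hne q hq]),
        ← List.append_assoc]
    have hcont : (d.erase p.1).contains p.1 = false := by
      simp only [PySem.Dict.contains, herase, List.any_eq_false]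
      intro q hq
      simp [hkeyall q hq]
    have hmove : (pvMove d p.1).items = u ++ t' ++ (e ++ [p]) := by
      simp only [pvMove, hget, PySem.Dict.insert, hcont, Bool.false_eq_true, if_false, herase]
      simp
    simp only [List.map_cons, List.foldl_cons]
    rw [ih u (e ++ [p]) (pvMove d p.1) hmove
      (by simp only [List.map_cons, List.nodup_cons] at hnd; exact hnd.2)
      (fun q hq => hu q (by simp [hq]))
      (by intro q hq
          simp only [List.map_append, List.mem_append, List.map_cons]
          rintro (h1 | h1)
          · exact he q (by simp [hq]) h1
          · simp only [List.map_nil, List.mem_cons, List.not_mem_nil, or_false] at h1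
            exact hpt' (by rw [← h1]; exact List.mem_map_of_mem hq))]
    simp

-- a replacement map over pairs whose key is absent is the identity
theorem pvRepl_id (l : List (String × String)) (k : String) (v : String)
    (h : k ∉ l.map (·.1)) :
    l.map (fun p => if p.1 == k then (k, v) else p) = l := by
  rw [List.map_congr_left (g := id), List.map_id]
  intro p hp
  have : p.1 ≠ k := by intro he; exact h (by rw [← he]; exact List.mem_map_of_mem hp)
  simp [this]

-- the replacement map keeps the key list unchanged
theorem pvRepl_keys (l : List (String × String)) (k : String) (v : String) :
    (l.map (fun p => if p.1 == k then (k, v) else p)).map (·.1) = l.map (·.1) := by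
  rw [List.map_map]
  apply List.map_congr_left
  intro p _
  by_cases h : p.1 = k <;> simp [h]

-- The canonical split form equals B under Pre_.
theorem pvCanon_eq_alt (x : List (String × String)) (y : List (String × String))
    (hpre : Pre_merge_two_ordered_dicts x y) :
    pvCanon x y = merge_two_ordered_dicts_alt x y := by
  obtain ⟨hby, hnx, hny, hnt⟩ := hpre
  unfold pvCanon merge_two_ordered_dicts_alt
  simp only []
  set pos : Nat := (PySem.List.index? (y.map (·.1)) "Breakpoint_B").getD 0 + 1 with hposdef
  set ybb := (PySem.Dict.mk y).getD "Breakpoint_B" "" with hybb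
  have hsize : (PySem.Dict.mk x).size = x.length := rfl
  rw [hsize]
  rcases Nat.lt_or_ge pos x.length with hlt | hge
  · -- x is long enough: the splice happens
    rw [if_pos hlt, if_pos hlt]
    set head := x.take pos with hhead
    set tail := x.drop pos with htail
    have hx : x = head ++ tail := (List.take_append_drop pos x).symm
    have hndh : (head.map (·.1)).Nodup := by
      rw [hx] at hnx; simp only [List.map_append, List.nodup_append] at hnx; exact hnx.1
    have hndt : (tail.map (·.1)).Nodup := by
      rw [hx] at hnx; simp only [List.map_append, List.nodup_append] at hnx; exact hnx.2.1
    have hdisj : ∀ p ∈ tail, p.1 ∉ head.map (·.1) := by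
      rw [hx] at hnx; simp only [List.map_append, List.nodup_append] at hnx
      intro p hp hmem
      exact hnx.2.2 p.1 hmem p.1 (List.mem_map_of_mem hp) rfl
    have hbt : ∀ p ∈ tail, p.1 ≠ "Breakpoint_B" := by
      intro p hp he
      exact hnt (by rw [← List.map_drop]; rw [← he]; exact List.mem_map_of_mem hp)
    have hitems := pvFresh_fold head hndh
    have hkeysdrop : (x.map (·.1)).drop pos = tail.map (·.1) := by
      rw [List.map_drop]
    rw [hkeysdrop]
    -- the head dict and the whole dict, after the Breakpoint_B insert
    by_cases hmem : "Breakpoint_B" ∈ head.map (·.1)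
    · -- Breakpoint_B already sits in the head: both sides update it in place
      have hcA : (head.foldl pvFB (PySem.Dict.empty : PySem.Dict String String)).contains "Breakpoint_B" = true := by
        simp only [PySem.Dict.contains, hitems, List.any_eq_true]
        obtain ⟨p, hp, hp1⟩ := List.mem_map.mp hmem
        exact ⟨p, hp, by simp [hp1]⟩
      have hmemx : "Breakpoint_B" ∈ x.map (·.1) := by
        rw [hx]; simp only [List.map_append, List.mem_append]; exact Or.inl hmem
      have hcB : (PySem.Dict.mk x).contains "Breakpoint_B" = true := by
        simp only [PySem.Dict.contains, List.any_eq_true]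
        obtain ⟨p, hp, hp1⟩ := List.mem_map.mp hmemx
        exact ⟨p, hp, by simp [hp1]⟩
      -- A side: head replaced, then fresh tail appended
      set head' := head.map (fun p => if p.1 == "Breakpoint_B" then ("Breakpoint_B", ybb) else p) with hhead'
      have hA1 : ((head.foldl pvFB (PySem.Dict.empty : PySem.Dict String String)).insert "Breakpoint_B" ybb).items = head' := by
        simp only [PySem.Dict.insert, hcA, if_true, hitems]
        exact hhead'.symm
      have hAkeys : ∀ p ∈ tail,
          ((head.foldl pvFB (PySem.Dict.empty : PySem.Dict String String)).insert "Breakpoint_B" ybb).contains p.1 = false := by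
        intro p hp
        simp only [PySem.Dict.contains, hA1, List.any_eq_false]
        intro q hq
        simp only [beq_iff_eq]
        intro he
        have : q.1 ∈ head'.map (·.1) := by rw [← he] at *; exact List.mem_map_of_mem hq
        rw [hhead', pvRepl_keys] at this
        rw [he] at this
        exact hdisj p hp this
      have hA : (tail.foldl pvFB
          ((head.foldl pvFB (PySem.Dict.empty : PySem.Dict String String)).insert "Breakpoint_B" ybb)).items
          = ((head.foldl pvFB (PySem.Dict.empty : PySem.Dict String String)).insert "Breakpoint_B" ybb).items ++ tail := by
        simpa [pvFB] using PySem.Dict.items_foldl_insert_fresh (l := tail) (k := (·.1)) (v := (·.2))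
          (d := (head.foldl pvFB (PySem.Dict.empty : PySem.Dict String String)).insert "Breakpoint_B" ybb)
          hAkeys hndt
      -- B side
      have hB1 : ((PySem.Dict.mk x).insert "Breakpoint_B" ybb).items = head' ++ tail := by
        simp only [PySem.Dict.insert, hcB, if_true]
        show x.map _ = _
        rw [hx, List.map_append, hhead']
        congr 1
        exact pvRepl_id tail "Breakpoint_B" ybb (by
          intro hc
          obtain ⟨p, hp, hp1⟩ := List.mem_map.mp hc
          exact hbt p hp hp1)
      rw [pvMoveFold tail head' [] _ (by rw [hB1]; simp) hndt
        (by intro p hp; rw [hhead', pvRepl_keys]; exact hdisj p hp)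
        (by intro p _; simp)]
      rw [hA, hA1]
      simp
    · -- Breakpoint_B is fresh: A appends it between head and tail, B appends then rotates
      have hmemx : "Breakpoint_B" ∉ x.map (·.1) := by
        rw [hx]; simp only [List.map_append, List.mem_append]
        rintro (h | h)
        · exact hmem h
        · exact hnt (by rw [← List.map_drop] at *; exact h)
      have hcA : (head.foldl pvFB (PySem.Dict.empty : PySem.Dict String String)).contains "Breakpoint_B" = false := by
        simp only [PySem.Dict.contains, hitems, List.any_eq_false]
        intro q hq
        simp only [beq_iff_eq]
        intro he
        exact hmem (by rw [← he]; exact List.mem_map_of_mem hq)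
      have hcB : (PySem.Dict.mk x).contains "Breakpoint_B" = false := by
        simp only [PySem.Dict.contains, List.any_eq_false]
        intro q hq
        simp only [beq_iff_eq]
        intro he
        exact hmemx (by rw [← he]; exact List.mem_map_of_mem hq)
      have hA1 : ((head.foldl pvFB (PySem.Dict.empty : PySem.Dict String String)).insert "Breakpoint_B" ybb).items = head ++ [("Breakpoint_B", ybb)] := by
        simp only [PySem.Dict.insert, hcA, Bool.false_eq_true, if_false, hitems]
      have hAkeys : ∀ p ∈ tail,
          ((head.foldl pvFB (PySem.Dict.empty : PySem.Dict String String)).insert "Breakpoint_B" ybb).contains p.1 = false := by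
        intro p hp
        simp only [PySem.Dict.contains, hA1, List.any_eq_false]
        intro q hq
        simp only [beq_iff_eq]
        intro he
        rcases List.mem_append.mp hq with hq' | hq'
        · exact hdisj p hp (by rw [← he]; exact List.mem_map_of_mem hq')
        · simp only [List.mem_cons, List.not_mem_nil, or_false] at hq'
          exact hbt p hp (by rw [← he, hq'])
      have hA : (tail.foldl pvFB
          ((head.foldl pvFB (PySem.Dict.empty : PySem.Dict String String)).insert "Breakpoint_B" ybb)).items
          = ((head.foldl pvFB (PySem.Dict.empty : PySem.Dict String String)).insert "Breakpoint_B" ybb).items ++ tail := by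
        simpa [pvFB] using PySem.Dict.items_foldl_insert_fresh (l := tail) (k := (·.1)) (v := (·.2))
          (d := (head.foldl pvFB (PySem.Dict.empty : PySem.Dict String String)).insert "Breakpoint_B" ybb)
          hAkeys hndt
      have hB1 : ((PySem.Dict.mk x).insert "Breakpoint_B" ybb).items = head ++ tail ++ [("Breakpoint_B", ybb)] := by
        simp only [PySem.Dict.insert, hcB, Bool.false_eq_true, if_false]
        show x ++ _ = _
        rw [hx]
      rw [pvMoveFold tail head [("Breakpoint_B", ybb)] _ hB1 hndt hdisj
        (by intro p hp; simp only [List.map_cons, List.map_nil, List.mem_cons, List.not_mem_nil, or_false]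
            exact hbt p hp)]
      rw [hA, hA1]
  · -- x too short: no splice on either side
    rw [if_neg (by omega), if_neg (by omega)]
    have hdrop : x.drop pos = [] := List.drop_eq_nil_iff.mpr (by omega)
    have htake : x.take pos = x := List.take_of_length_le (by omega)
    rw [hdrop, htake]
    simp only [List.foldl_nil]
    exact pvFresh_fold x hnx

-- ===== VERDICT (by name: the statement is the Claim_ definition above) =====
theorem merge_two_ordered_dicts_spec : Claim_equal_merge_two_ordered_dicts := by
  unfold Claim_equal_merge_two_ordered_dicts
  intro x y _ hpre
  unfold Spec_merge_two_ordered_dicts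
  rw [pvA_eq_canon, pvCanon_eq_alt x y hpre]
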